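-- pv_equiv track=rewrite | github.com/nemvince/nokia-hackathon-2025 | fibonacci/main.py | solve
-- ===== SOURCE A (Python) =====
-- from typing import List
--
-- def fibonacci_up_to(N: int) -> list[int]:
--     fib_numbers: List[int] = []
--     a, b = 0, 1
--     while a <= N:
--         fib_numbers.append(a)
--         a, b = b, a + b
--     return fib_numbers
--
-- def solve(line: str) -> str:
--     try:
--         N: int = int(line.strip())
--     except ValueError:
--         return "N/A"
--
--     fib_numbers = fibonacci_up_to(N)
--     filtered = [x for x in fib_numbers if x % 3 == 0]
--
--     return "N/A" if not filtered else ", ".join(map(str, filtered))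
-- ===== SOURCE B (Python) =====
-- def solve(line: str) -> str:
--     # generate only the Fibonacci numbers divisible by 3 (F_0, F_4, F_8, ...)
--     # via the subsequence recurrence a_{k+1} = 7*a_k - a_{k-1}, seeds 0, 3
--     try:
--         N = int(line.strip())
--     except ValueError:
--         return "N/A"
--     res = []
--     a, b = 0, 3
--     while a <= N:
--         res.append(a)
--         a, b = b, 7 * b - a
--     return ", ".join(map(str, res)) if res else "N/A"
-- ===== Notes on version B (the rewrite author's own statement) =====
-- stated objective: alternative
-- what changed: B drops the generate-all-then-filter structure: it generates only the Fibonacci numbers divisible by 3 directly via the subsequence recurrence a_k = 7*a_{k-1} - a_{k-2} seeded with 0 and 3, so there is no filtering pass and 4x fewer loop iterations (too cheap either way for a timing run to separate).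
import Mathlib
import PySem

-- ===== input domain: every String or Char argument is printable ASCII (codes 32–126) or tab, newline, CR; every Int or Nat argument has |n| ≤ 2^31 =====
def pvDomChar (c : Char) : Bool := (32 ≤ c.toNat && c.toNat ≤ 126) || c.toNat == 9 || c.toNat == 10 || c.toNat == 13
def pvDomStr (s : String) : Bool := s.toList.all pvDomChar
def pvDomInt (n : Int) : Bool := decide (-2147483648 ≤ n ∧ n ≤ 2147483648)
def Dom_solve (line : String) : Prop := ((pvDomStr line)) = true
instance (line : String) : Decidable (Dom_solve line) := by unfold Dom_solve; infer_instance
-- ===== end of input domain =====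

-- B generates only the Fibonacci numbers divisible by 3 directly (a_k = 7*a_{k-1} - a_{k-2},
-- seeds 0 and 3), removing A's filter pass; objective: alternative decomposition.

-- ===== PORT A =====
-- Python's `while a <= N: append a; a, b = b, a+b` as well-founded recursion; the
-- invariant arguments (0 ≤ a ≤ b, 1 ≤ b) hold at the only call site (a,b) = (0,1)
-- and are needed for termination.
def fibLoopA (N a b : Int) (ha : 0 ≤ a) (_hab : a ≤ b) (hb : 1 ≤ b) : List Int :=
  if h : a ≤ N then a :: fibLoopA N b (a + b) (by omega) (by omega) (by omega) else []
  termination_by 2 * (N + 1 - a).toNat + (if a < b then 0 else 1)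
  decreasing_by split_ifs <;> omega

def fibonacci_up_to (N : Int) : List Int :=
  fibLoopA N 0 1 (by omega) (by omega) (by omega)

def solve (line : String) : String :=
  match PySem.Int.ofStr? (PySem.Str.strip line) with
  | none => "N/A"
  | some N =>
      if ((fibonacci_up_to N).filter (fun x => PySem.Int.mod x 3 == 0)).isEmpty then "N/A"
      else PySem.Str.join ", " (((fibonacci_up_to N).filter (fun x => PySem.Int.mod x 3 == 0)).map PySem.Int.toStr)

-- ===== PORT B =====
-- Python B's `while a <= N: append a; a, b = b, 7*b - a`; invariant 0 ≤ a < b.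
def fibLoopB (N a b : Int) (ha : 0 ≤ a) (hab : a < b) : List Int :=
  if h : a ≤ N then a :: fibLoopB N b (7 * b - a) (by omega) (by omega) else []
  termination_by (N + 1 - a).toNat
  decreasing_by omega

def solve_alt (line : String) : String :=
  match PySem.Int.ofStr? (PySem.Str.strip line) with
  | none => "N/A"
  | some N =>
      if (fibLoopB N 0 3 (by omega) (by omega)).isEmpty then "N/A"
      else PySem.Str.join ", " ((fibLoopB N 0 3 (by omega) (by omega)).map PySem.Int.toStr)

-- ===== PRECONDITION & SPEC =====
def Spec_solve (line : String) (out : String) : Prop := out = solve_alt line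
instance (line : String) (out : String) : Decidable (Spec_solve line out) := by unfold Spec_solve; infer_instance

-- ===== CLAIM (what is proved, stated in full; the proofs are below) =====
def Claim_equal_solve : Prop := ∀ (line : String), Dom_solve line → Spec_solve line (solve line)

-- ===== LEMMAS AND PROOFS =====

theorem fibLoopB_congr (N a b a' b' : Int) (h1 : a = a') (h2 : b = b')
    (p1 : 0 ≤ a) (p2 : a < b) (q1 : 0 ≤ a') (q2 : a' < b') :
    fibLoopB N a b p1 p2 = fibLoopB N a' b' q1 q2 := by
  subst h1; subst h2; rfl

-- dropping one non-multiple-of-3 head from A's loop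
theorem filter_skip (N x y : Int) (hx : 0 ≤ x) (hxy : x ≤ y) (hy : 1 ≤ y) (h3 : ¬ (x % 3 = 0)) :
    (fibLoopA N x y hx hxy hy).filter (fun z => z % 3 == 0)
      = if x ≤ N then (fibLoopA N y (x + y) (by omega) (by omega) (by omega)).filter (fun z => z % 3 == 0)
        else [] := by
  rw [fibLoopA]
  by_cases h : x ≤ N
  · simp [h, h3]
  · simp [h]

-- main lemma: filtering A's Fibonacci run from (a,b) with 3 ∣ a and b ≢ 0 (mod 3)
-- yields exactly B's run seeded at (a, 2a+3b) (the next Fibonacci multiple of 3)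
theorem filterA_eq_B (N a b : Int) (ha : 0 ≤ a) (hab : a ≤ b) (hb : 1 ≤ b)
    (h3a : a % 3 = 0) (h3b : b % 3 = 1 ∨ b % 3 = 2) :
    (fibLoopA N a b ha hab hb).filter (fun z => z % 3 == 0)
      = fibLoopB N a (2 * a + 3 * b) ha (by omega) := by
  rw [fibLoopA, fibLoopB]
  by_cases h : a ≤ N
  · rw [dif_pos h, dif_pos h]
    rw [List.filter_cons_of_pos (by simp [h3a])]
    congr 1
    rw [filter_skip N b (a + b) (by omega) (by omega) (by omega) (by omega)]
    by_cases h1 : b ≤ N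
    · rw [if_pos h1,
          filter_skip N (a + b) (b + (a + b)) (by omega) (by omega) (by omega) (by omega)]
      by_cases h2 : a + b ≤ N
      · rw [if_pos h2,
            filter_skip N (b + (a + b)) ((a + b) + (b + (a + b))) (by omega) (by omega) (by omega) (by omega)]
        by_cases h3 : b + (a + b) ≤ N
        · rw [if_pos h3,
              filterA_eq_B N ((a + b) + (b + (a + b))) ((b + (a + b)) + ((a + b) + (b + (a + b))))
                (by omega) (by omega) (by omega) (by omega) (by omega)]
          exact fibLoopB_congr N _ _ _ _ (by ring) (by ring) _ _ _ _
        · rw [if_neg h3, fibLoopB, dif_neg (by omega)]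
      · rw [if_neg h2, fibLoopB, dif_neg (by omega)]
    · rw [if_neg h1, fibLoopB, dif_neg (by omega)]
  · rw [dif_neg h, dif_neg h, List.filter_nil]
  termination_by (N + 1 - a).toNat
  decreasing_by omega

theorem pred_eq : (fun x : Int => PySem.Int.mod x 3 == 0) = (fun z : Int => z % 3 == 0) :=
  funext fun x => by rw [PySem.Int.mod_eq_emod_of_pos (by norm_num)]

theorem filtered_eq (N : Int) :
    (fibonacci_up_to N).filter (fun x => PySem.Int.mod x 3 == 0)
      = fibLoopB N 0 3 (by omega) (by omega) := by
  rw [pred_eq]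
  unfold fibonacci_up_to
  rw [filterA_eq_B N 0 1 (by omega) (by omega) (by omega) (by omega) (by omega)]
  exact fibLoopB_congr N _ _ _ _ rfl (by ring) _ _ _ _

-- ===== VERDICT (by name: the statement is the Claim_ definition above) =====
theorem solve_spec : Claim_equal_solve := by
  intro line _
  unfold Spec_solve solve solve_alt
  cases PySem.Int.ofStr? (PySem.Str.strip line) with
  | none => rfl
  | some N => simp only [filtered_eq]
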